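-- pv_equiv track=rewrite | github.com/229DarkKnight/Language_Sintax_Parser | tests/CFG.py | fix_str_html
-- ===== SOURCE A (Python) =====
-- def fix_str_html(program_str: str) -> str:
--     inside_tag = False
--     result = ''
--     for char in program_str:
--         if char == '<':
--             inside_tag = True
--         elif char == '>':
--             inside_tag = False
--         if ( char.isspace() or char in ('\n', '\t') ) and not inside_tag:
--             continue
--         result += char
--     return result.lower()
-- ===== SOURCE B (Python) =====
-- def fix_str_html(program_str: str) -> str:
--     pieces = []
--     i = 0
--     n = len(program_str)
--     while i < n:
--         j = program_str.find('<', i)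
--         if j == -1:
--             pieces.append(''.join(c for c in program_str[i:] if not c.isspace()))
--             break
--         pieces.append(''.join(c for c in program_str[i:j] if not c.isspace()))
--         k = program_str.find('>', j)
--         if k == -1:
--             pieces.append(program_str[j:])
--             break
--         pieces.append(program_str[j:k + 1])
--         i = k + 1
--     return ''.join(pieces).lower()
-- ===== Notes on version B (the rewrite author's own statement) =====
-- stated objective: alternative
-- what changed: Replaced the per-character inside_tag flag toggle with a segment scan that uses str.find to jump to the next '<' / '>', stripping whitespace from outside segments in bulk and copying tag regions verbatim.
import Mathlib
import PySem

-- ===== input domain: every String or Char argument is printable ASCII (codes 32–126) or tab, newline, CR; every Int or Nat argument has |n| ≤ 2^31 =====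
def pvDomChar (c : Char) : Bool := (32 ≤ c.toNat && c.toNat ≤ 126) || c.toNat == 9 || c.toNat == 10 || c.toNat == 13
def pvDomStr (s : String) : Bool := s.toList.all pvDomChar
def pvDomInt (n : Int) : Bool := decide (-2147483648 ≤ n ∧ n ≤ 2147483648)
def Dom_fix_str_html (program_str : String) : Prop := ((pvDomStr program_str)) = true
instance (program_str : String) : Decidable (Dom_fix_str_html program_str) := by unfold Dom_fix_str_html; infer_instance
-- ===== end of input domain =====

-- B replaces A's per-character inside_tag flag with a find-based segment scan (strip outside slices in bulk, copy '<…>' regions verbatim); alternative decomposition, same cost.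

-- ===== PORT A =====
-- the updated inside_tag flag after seeing char c
def pvI (inside : Bool) (c : Char) : Bool :=
  if c = '<' then true else if c = '>' then false else inside
-- A's 'continue' condition (drop the char): (char.isspace() or char in ('\n','\t')) and not inside_tag
def pvDrop (inside : Bool) (c : Char) : Bool :=
  (PySem.Chars.isspace c || (c = '\n' || c = '\t')) && !(pvI inside c)
-- one loop iteration of A over state (inside_tag, result)
def pvAStep (st : Bool × List Char) (c : Char) : Bool × List Char :=
  if pvDrop st.1 c then (pvI st.1 c, st.2) else (pvI st.1 c, st.2 ++ [c])
-- literal transliteration of A: fold the loop body over the characters, then .lower()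
def fix_str_html (program_str : String) : String :=
  PySem.Str.lower (String.ofList (program_str.toList.foldl pvAStep (false, [])).2)

-- ===== PORT B =====
-- Source B's find-based scan: take the outside slice up to the next '<' and filter its
-- whitespace out, then copy the slice up to (and including) the next '>' verbatim;
-- if either find fails, handle the tail as Source B does and stop.
def pvBScan (l : List Char) : List Char :=
  let pre := l.takeWhile (· ≠ '<')
  let rest := l.dropWhile (· ≠ '<')
  match rest with
  | [] => pre.filter (fun c => !PySem.Chars.isspace c)
  | _ :: _ =>
    let tag := rest.takeWhile (· ≠ '>')
    let rest2 := rest.dropWhile (· ≠ '>')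
    match hr2 : rest2 with
    | [] => pre.filter (fun c => !PySem.Chars.isspace c) ++ rest
    | c :: tl => pre.filter (fun c => !PySem.Chars.isspace c) ++ tag ++ (c :: pvBScan tl)
termination_by l.length
decreasing_by
  have h1 : rest.length ≤ l.length := by
    simpa [rest] using List.length_dropWhile_le (p := (· ≠ '<')) (l := l)
  have h2 : rest2.length ≤ rest.length := by
    simpa [rest2] using List.length_dropWhile_le (p := (· ≠ '>')) (l := rest)
  have h3 : tl.length + 1 ≤ rest2.length := by simp [hr2]
  omega

def fix_str_html_alt (program_str : String) : String :=
  PySem.Str.lower (String.ofList (pvBScan program_str.toList))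

-- ===== PRECONDITION & SPEC =====
def Spec_fix_str_html (program_str : String) (out : String) : Prop := out = fix_str_html_alt program_str
instance (program_str : String) (out : String) : Decidable (Spec_fix_str_html program_str out) := by unfold Spec_fix_str_html; infer_instance

-- ===== CLAIM (what is proved, stated in full; the proofs are below) =====
def Claim_equal_fix_str_html : Prop := ∀ (program_str : String), Dom_fix_str_html program_str → Spec_fix_str_html program_str (fix_str_html program_str)

-- ===== LEMMAS AND PROOFS =====

-- the characters A's flag machine emits, started in state `inside`
def pvAOut (inside : Bool) : List Char → List Char
  | [] => []
  | c :: tl =>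
    if pvDrop inside c then pvAOut (pvI inside c) tl
    else c :: pvAOut (pvI inside c) tl

theorem pvFoldEq (l : List Char) : ∀ (inside : Bool) (acc : List Char),
    (l.foldl pvAStep (inside, acc)).2 = acc ++ pvAOut inside l := by
  induction l with
  | nil => intro inside acc; simp [pvAOut]
  | cons c tl ih =>
    intro inside acc
    simp only [List.foldl_cons, pvAStep]
    cases h : pvDrop inside c <;> simp [h, ih, pvAOut]

theorem pvDropTrue (c : Char) (h : c ≠ '>') : pvDrop true c = false := by
  simp [pvDrop, pvI, h]

theorem pvITrue (c : Char) (h : c ≠ '>') : pvI true c = true := by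
  by_cases hl : c = '<' <;> simp [pvI, hl, h]

theorem pvSpaceCond (c : Char) :
    (PySem.Chars.isspace c || (decide (c = '\n') || decide (c = '\t'))) = PySem.Chars.isspace c := by
  cases h : PySem.Chars.isspace c
  · simp only [Bool.false_or]
    by_cases hn : c = '\n'
    · subst hn; simp [PySem.Chars.isspace] at h
    · by_cases ht : c = '\t'
      · subst ht; simp [PySem.Chars.isspace] at h
      · simp [hn, ht]
  · simp [h]

theorem pvDropFalse (c : Char) (h : c ≠ '<') : pvDrop false c = PySem.Chars.isspace c := by
  by_cases hg : c = '>' <;> simp [pvDrop, pvI, h, hg, pvSpaceCond]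

theorem pvIFalse (c : Char) (h : c ≠ '<') : pvI false c = false := by
  by_cases hg : c = '>' <;> simp [pvI, h, hg]

-- inside a tag, A copies everything up to and including the next '>' verbatim
theorem pvAOutTrue (l : List Char) :
    pvAOut true l = l.takeWhile (· ≠ '>') ++
      (match l.dropWhile (· ≠ '>') with
       | [] => []
       | c :: tl => c :: pvAOut false tl) := by
  induction l with
  | nil => simp [pvAOut]
  | cons c tl ih =>
    by_cases h : c = '>'
    · subst h
      have hd : pvDrop true '>' = false := by decide
      have hi : pvI true '>' = false := by decide
      simp [pvAOut, hd, hi, List.takeWhile_cons, List.dropWhile_cons]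
    · simp [pvAOut, pvDropTrue c h, pvITrue c h, List.takeWhile_cons, List.dropWhile_cons, h, ih]


theorem pvB_nil (l : List Char) (h : l.dropWhile (· ≠ '<') = []) :
    pvBScan l = (l.takeWhile (· ≠ '<')).filter (fun c => !PySem.Chars.isspace c) := by
  rw [pvBScan.eq_def]
  simp only [h]

theorem pvB_noClose (l : List Char) (d : Char) (dl : List Char)
    (h : l.dropWhile (· ≠ '<') = d :: dl) (h2 : (d :: dl).dropWhile (· ≠ '>') = []) :
    pvBScan l = (l.takeWhile (· ≠ '<')).filter (fun c => !PySem.Chars.isspace c) ++ (d :: dl) := by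
  rw [pvBScan.eq_def]
  simp only [h]
  split
  · rfl
  · rename_i hq
    rw [h] at hq
    rw [h2] at hq
    exact absurd hq (by simp)

theorem pvB_close (l : List Char) (d e : Char) (dl el : List Char)
    (h : l.dropWhile (· ≠ '<') = d :: dl) (h2 : (d :: dl).dropWhile (· ≠ '>') = e :: el) :
    pvBScan l = (l.takeWhile (· ≠ '<')).filter (fun c => !PySem.Chars.isspace c) ++
      (d :: dl).takeWhile (· ≠ '>') ++ (e :: pvBScan el) := by
  rw [pvBScan.eq_def]
  simp only [h]
  split
  · rename_i hq
    rw [h] at hq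
    rw [h2] at hq
    exact absurd hq (by simp)
  · rename_i c' tl' hq
    rw [h] at hq
    rw [h2] at hq
    obtain ⟨he, hel⟩ := List.cons.injEq .. ▸ hq
    subst he; subst hel
    simp

theorem pvBScan_cons_ne (c : Char) (tl : List Char) (h : c ≠ '<') :
    pvBScan (c :: tl) = (if PySem.Chars.isspace c then [] else [c]) ++ pvBScan tl := by
  have hdw : (c :: tl).dropWhile (· ≠ '<') = tl.dropWhile (· ≠ '<') := by
    simp [List.dropWhile_cons, h]
  have htw : (c :: tl).takeWhile (· ≠ '<') = c :: tl.takeWhile (· ≠ '<') := by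
    simp [List.takeWhile_cons, h]
  cases hr : tl.dropWhile (· ≠ '<') with
  | nil =>
    rw [pvB_nil (c :: tl) (hdw.trans hr), pvB_nil tl hr, htw, List.filter_cons]
    cases hsp : PySem.Chars.isspace c <;> simp
  | cons d dl =>
    cases hr2 : (d :: dl).dropWhile (· ≠ '>') with
    | nil =>
      rw [pvB_noClose (c :: tl) d dl (hdw.trans hr) hr2, pvB_noClose tl d dl hr hr2,
        htw, List.filter_cons]
      cases hsp : PySem.Chars.isspace c <;> simp
    | cons e el =>
      rw [pvB_close (c :: tl) d e dl el (hdw.trans hr) hr2, pvB_close tl d e dl el hr hr2,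
        htw, List.filter_cons]
      cases hsp : PySem.Chars.isspace c <;> simp

theorem pvBScan_eq_aOut : ∀ (n : Nat) (l : List Char), l.length ≤ n →
    pvBScan l = pvAOut false l := by
  intro n
  induction n with
  | zero =>
    intro l hl
    have : l = [] := List.eq_nil_of_length_eq_zero (Nat.le_zero.mp hl)
    subst this
    rw [pvB_nil [] (by simp)]
    simp [pvAOut]
  | succ n ih =>
    intro l hl
    cases l with
    | nil =>
      rw [pvB_nil [] (by simp)]
      simp [pvAOut]
    | cons c tl =>
      by_cases h : c = '<'
      · subst h
        have hA : pvAOut false ('<' :: tl) = '<' :: pvAOut true tl := by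
          have hd : pvDrop false '<' = false := by decide
          have hi : pvI false '<' = true := by decide
          simp [pvAOut, hd, hi]
        have hdw : ('<' :: tl).dropWhile (· ≠ '<') = '<' :: tl := by
          simp [List.dropWhile_cons]
        rw [hA, pvAOutTrue]
        cases hr2 : tl.dropWhile (· ≠ '>') with
        | nil =>
          have hr2' : ('<' :: tl).dropWhile (· ≠ '>') = [] := by
            rw [List.dropWhile_cons, if_pos (by decide : (decide ('<' ≠ '>')) = true)]
            exact hr2
          rw [pvB_noClose ('<' :: tl) '<' tl hdw hr2']
          have hall : ∀ x ∈ tl, ¬ x = '>' := by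
            intro x hx
            have h' := List.dropWhile_eq_nil_iff.mp hr2 x hx
            simpa using h'
          have htk : List.takeWhile (fun x : Char => !decide (x = '>')) tl = tl := by
            rw [List.takeWhile_eq_self_iff]
            intro x hx
            simpa using hall x hx
          simp [hr2, htk]
        | cons e el =>
          have hel : el.length ≤ n := by
            have h1 : (tl.dropWhile (· ≠ '>')).length ≤ tl.length :=
              List.length_dropWhile_le _ _
            rw [hr2] at h1
            simp at h1 hl
            omega
          have hr2' : ('<' :: tl).dropWhile (· ≠ '>') = e :: el := by
            rw [List.dropWhile_cons, if_pos (by decide : (decide ('<' ≠ '>')) = true)]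
            exact hr2
          rw [pvB_close ('<' :: tl) '<' e tl el hdw hr2']
          have hfun : (fun x : Char => !decide (x = '>')) = (fun x : Char => decide (x ≠ '>')) := by
            funext x
            simp [ne_eq]
          have hr2n : List.dropWhile (fun x : Char => !decide (x = '>')) tl = e :: el := by
            rw [hfun]
            exact hr2
          simp [hr2n, List.takeWhile_cons, ih el hel]
      · have hA : pvAOut false (c :: tl) =
            (if PySem.Chars.isspace c then [] else [c]) ++ pvAOut false tl := by
          simp only [pvAOut, pvDropFalse c h, pvIFalse c h]
          cases hsp : PySem.Chars.isspace c <;> simp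
        rw [pvBScan_cons_ne c tl h, hA, ih tl (by simp at hl; omega)]

-- ===== VERDICT (by name: the statement is the Claim_ definition above) =====
theorem fix_str_html_spec : Claim_equal_fix_str_html := by
  intro s _
  unfold Spec_fix_str_html fix_str_html fix_str_html_alt
  rw [pvFoldEq, pvBScan_eq_aOut s.toList.length s.toList (le_refl _)]
  simp
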